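-- pv_equiv track=rewrite | github.com/daeunni/StreamGaze | pipeline/qa_generation/present.py | _label_options_id
-- ===== SOURCE A (Python) =====
-- def _label_options_id(options_plain, correct_idx):
--     labels = ["A","B","C","D","E","F","G","H"]
--     labeled, answer_letter = [], None
--     for i, opt in enumerate(options_plain):
--         lab = labels[i]
--         labeled.append(f"{lab}. {opt}")
--         if i == correct_idx:
--             answer_letter = lab
--     return labeled, answer_letter
-- ===== SOURCE B (Python) =====
-- def _label_options_id(options_plain, correct_idx):
--     def go(opts, i):
--         if not opts:
--             return []
--         return [chr(65 + i) + ". " + opts[0]] + go(opts[1:], i + 1)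
--     labeled = go(options_plain, 0)
--     answer_letter = chr(65 + correct_idx) if 0 <= correct_idx < len(options_plain) else None
--     return labeled, answer_letter
-- ===== Notes on version B (the rewrite author's own statement) =====
-- stated objective: alternative
-- what changed: Drops A's labels table and in-loop match state entirely: B generates each label arithmetically with chr(65+i) while building the labeled list by structural recursion, and computes answer_letter in closed form as chr(65+correct_idx) under a range guard.
import Mathlib
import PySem

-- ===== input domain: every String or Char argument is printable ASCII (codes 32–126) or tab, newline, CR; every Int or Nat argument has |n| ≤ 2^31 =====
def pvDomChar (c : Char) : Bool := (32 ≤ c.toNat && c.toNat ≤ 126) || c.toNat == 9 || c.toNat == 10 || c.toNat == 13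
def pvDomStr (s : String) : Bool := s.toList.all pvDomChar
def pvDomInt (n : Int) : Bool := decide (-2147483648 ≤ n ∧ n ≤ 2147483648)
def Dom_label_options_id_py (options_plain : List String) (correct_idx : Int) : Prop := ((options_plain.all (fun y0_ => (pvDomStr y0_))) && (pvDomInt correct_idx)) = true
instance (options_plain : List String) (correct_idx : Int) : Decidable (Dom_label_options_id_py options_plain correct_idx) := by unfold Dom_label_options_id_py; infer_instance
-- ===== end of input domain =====

-- B drops A's labels table and in-loop match state: labels come from chr(65+i) arithmetic,
-- the labeled list is built by structural recursion, and the answer letter is a guarded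
-- closed-form chr(65+correct_idx); objective: alternative.

-- ===== PORT A =====
def label_options_id_py (options_plain : List String) (correct_idx : Int) : List String × Option String :=
  let labels : List String := ["A", "B", "C", "D", "E", "F", "G", "H"]
  (PySem.List.enumerate options_plain).foldl
    (fun st p =>
      -- labels[i]: Python raises IndexError for i ≥ 8; Pre_ excludes those inputs, so getD "" is unreachable
      let lab := (PySem.List.pyGet? labels p.1).getD ""
      (st.1 ++ [lab ++ ". " ++ p.2], if p.1 == correct_idx then some lab else st.2))
    ([], none)

-- ===== PORT B =====
-- chr(65 + i) for a nonnegative index, as a one-character string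
def chrLabel (i : Nat) : String := String.mk [Char.ofNat (65 + i)]

-- the recursive helper 'go' of Source B
def labelGo (opts : List String) (i : Nat) : List String :=
  match opts with
  | [] => []
  | o :: rest => [chrLabel i ++ ". " ++ o] ++ labelGo rest (i + 1)

def label_options_id_py_alt (options_plain : List String) (correct_idx : Int) : List String × Option String :=
  (labelGo options_plain 0,
   if 0 ≤ correct_idx ∧ correct_idx < (options_plain.length : Int) then
     some (chrLabel correct_idx.toNat)
   else none)

-- ===== PRECONDITION & SPEC =====
-- Pre_ excludes lists with more than 8 options: there Python A raises IndexError (labels[i]).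
def Pre_label_options_id_py (options_plain : List String) (correct_idx : Int) : Prop :=
  options_plain.length ≤ 8
instance (options_plain : List String) (correct_idx : Int) : Decidable (Pre_label_options_id_py options_plain correct_idx) := by unfold Pre_label_options_id_py; infer_instance

def pvWitness_label_options_id_py : List String × Int := (["cat", "dog", "owl"], 1)

def Spec_label_options_id_py (options_plain : List String) (correct_idx : Int) (out : List String × Option String) : Prop := out = label_options_id_py_alt options_plain correct_idx
instance (options_plain : List String) (correct_idx : Int) (out : List String × Option String) : Decidable (Spec_label_options_id_py options_plain correct_idx out) := by unfold Spec_label_options_id_py; infer_instance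

-- ===== CLAIM =====
def Claim_equal_label_options_id_py : Prop := ∀ (options_plain : List String) (correct_idx : Int), Dom_label_options_id_py options_plain correct_idx → Pre_label_options_id_py options_plain correct_idx → Spec_label_options_id_py options_plain correct_idx (label_options_id_py options_plain correct_idx)

-- ===== LEMMAS AND PROOFS =====

-- A's labels-table lookup agrees with B's chr arithmetic on indices 0..7
theorem pyGet_labels_eq_chr (s : Nat) (hs : s < 8) :
    (PySem.List.pyGet? ["A","B","C","D","E","F","G","H"] (s : Int)).getD "" = chrLabel s := by
  interval_cases s <;> decide

-- Loop invariant for A's fold, stated against B's recursive builder and closed-form answer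
theorem labelFold_invariant (correct_idx : Int)
    (l : List String) (s : Nat) (hlen : s + l.length ≤ 8)
    (a1 : List String) (a2 : Option String) :
    (PySem.List.enumerate l (s : Int)).foldl
      (fun st p =>
        let lab := (PySem.List.pyGet? ["A","B","C","D","E","F","G","H"] p.1).getD ""
        (st.1 ++ [lab ++ ". " ++ p.2], if p.1 == correct_idx then some lab else st.2))
      (a1, a2)
    = (a1 ++ labelGo l s,
       if (s : Int) ≤ correct_idx ∧ correct_idx < (s : Int) + l.length then
         some (chrLabel correct_idx.toNat)
       else a2) := by
  induction l generalizing s a1 a2 with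
  | nil =>
      simp only [PySem.List.enumerate_nil, List.foldl_nil, labelGo, List.append_nil]
      rw [if_neg (by simp only [List.length_nil]; push_cast; omega)]
  | cons x xs ih =>
      rw [PySem.List.enumerate_cons]
      simp only [List.foldl_cons]
      have hs8 : s < 8 := by simp only [List.length_cons] at hlen; omega
      have hcast : ((s : Int) + 1) = ((s + 1 : Nat) : Int) := by push_cast; omega
      rw [hcast, ih (s + 1) (by simp only [List.length_cons] at hlen; omega)]
      simp only [labelGo, Prod.mk.injEq, List.length_cons, beq_iff_eq]
      refine ⟨by rw [pyGet_labels_eq_chr s hs8]; simp, ?_⟩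
      by_cases h : (s : Int) = correct_idx
      · rw [if_pos h, if_neg (by push_cast; omega), if_pos (by push_cast; omega),
          pyGet_labels_eq_chr s hs8]
        have : correct_idx.toNat = s := by omega
        rw [this]
      · rw [if_neg h]
        by_cases h2 : ((s : Int) + 1 ≤ correct_idx ∧ correct_idx < ((s + 1 : Nat) : Int) + (xs.length : Int))
        · rw [if_pos (by push_cast at h2 ⊢; omega), if_pos (by push_cast at h2 ⊢; omega)]
        · rw [if_neg (by push_cast at h2 ⊢; omega), if_neg (by push_cast at h2 ⊢; omega)]

-- ===== VERDICT =====
theorem label_options_id_py_spec : Claim_equal_label_options_id_py := by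
  intro l c _ hpre
  unfold Spec_label_options_id_py label_options_id_py label_options_id_py_alt
  simp only []
  have h0 : ((0 : Nat) : Int) = (0 : Int) := rfl
  rw [show (PySem.List.enumerate l (0 : Int)) = (PySem.List.enumerate l ((0 : Nat) : Int)) from rfl,
    labelFold_invariant c l 0 (by simpa using hpre) [] none]
  simp only [List.nil_append, Nat.cast_zero, zero_add]
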